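-- pv_equiv track=rewrite | github.com/Ashraful0707/python-bootcamp | love_calculator.py | love_calculator
-- ===== SOURCE A (Python) =====
-- def love_calculator(name1, name2):
--     word1 = "TRUE"
--     word2 = "LOVE"
--     word1_lowercase = word1.lower()
--     word2_lowercase = word2.lower()
--     count1 = 0
--     count2 = 0
--     combined_name = (name1 + name2).lower()
--     for letter in combined_name:
--         if letter in word1_lowercase:
--             count1 += 1
--         if letter in word2_lowercase:
--             count2 += 1
--     total_love_score = int(str(count1) + str(count2))
--
--     if (total_love_score<10 or total_love_score>90):
--         return f'Your score is {total_love_score}, you go together like coke and mentos.'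
--     elif (total_love_score>40 and total_love_score<50):
--         return f'Your score is {total_love_score}, you are alright together.'
--     else:
--         return f'Your score is {total_love_score}.'
-- ===== SOURCE B (Python) =====
-- def love_calculator(name1, name2):
--     combined_name = (name1 + name2).lower()
--     letters = list(combined_name)
--     count1 = sum(letters.count(c) for c in "true")
--     count2 = sum(letters.count(c) for c in "love")
--     total_love_score = int(str(count1) + str(count2))
--
--     if (total_love_score < 10 or total_love_score > 90):
--         return f'Your score is {total_love_score}, you go together like coke and mentos.'
--     elif (total_love_score > 40 and total_love_score < 50):
--         return f'Your score is {total_love_score}, you are alright together.'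
--     else:
--         return f'Your score is {total_love_score}.'
-- ===== Notes on version B (the rewrite author's own statement) =====
-- stated objective: alternative
-- what changed: Replaced the single character-by-character scan with two membership tests per character by a target-letter-driven pass: for each of the eight fixed target letters, count its occurrences in the combined name and sum these counts (valid because the letters of 'true' and of 'love' are pairwise distinct).
import Mathlib
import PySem

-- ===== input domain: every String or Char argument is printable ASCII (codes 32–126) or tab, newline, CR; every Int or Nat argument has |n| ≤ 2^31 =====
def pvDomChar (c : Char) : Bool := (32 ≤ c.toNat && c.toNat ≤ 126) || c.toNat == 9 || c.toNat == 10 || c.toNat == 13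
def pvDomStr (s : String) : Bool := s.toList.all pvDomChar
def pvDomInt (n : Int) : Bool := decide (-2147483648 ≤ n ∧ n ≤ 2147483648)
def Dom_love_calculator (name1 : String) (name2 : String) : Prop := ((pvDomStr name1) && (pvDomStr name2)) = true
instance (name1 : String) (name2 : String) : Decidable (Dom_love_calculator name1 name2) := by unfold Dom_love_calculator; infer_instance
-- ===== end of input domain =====

-- B replaces A's single membership-testing scan by a target-letter-driven pass
-- (per-letter occurrence counts summed over the fixed words): an alternative decomposition, same cost.


-- ===== PORT A =====
def love_calculator (name1 : String) (name2 : String) : String :=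
  let word1 : String := "TRUE"
  let word2 : String := "LOVE"
  let word1_lowercase := PySem.Str.lower word1
  let word2_lowercase := PySem.Str.lower word2
  let combined_name := PySem.Str.lower (name1 ++ name2)
  -- the for-loop over the characters, carrying (count1, count2)
  let counts : Int × Int := combined_name.toList.foldl (fun acc letter =>
      let acc := if PySem.Chars.isIn [letter] word1_lowercase.toList then (acc.1 + 1, acc.2) else acc
      if PySem.Chars.isIn [letter] word2_lowercase.toList then (acc.1, acc.2 + 1) else acc)
    (0, 0)
  let total_love_score : Int :=
    (PySem.Int.ofStr? (PySem.Int.toStr counts.1 ++ PySem.Int.toStr counts.2)).getD 0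
  if total_love_score < 10 ∨ total_love_score > 90 then
    "Your score is " ++ PySem.Int.toStr total_love_score ++ ", you go together like coke and mentos."
  else if total_love_score > 40 ∧ total_love_score < 50 then
    "Your score is " ++ PySem.Int.toStr total_love_score ++ ", you are alright together."
  else
    "Your score is " ++ PySem.Int.toStr total_love_score ++ "."

-- ===== PORT B =====
def love_calculator_alt (name1 : String) (name2 : String) : String :=
  let combined_name := PySem.Str.lower (name1 ++ name2)
  let letters := combined_name.toList
  let count1 : Int := ("true".toList.map (fun c => (PySem.List.count letters c : Int))).sum
  let count2 : Int := ("love".toList.map (fun c => (PySem.List.count letters c : Int))).sum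
  let total_love_score : Int :=
    (PySem.Int.ofStr? (PySem.Int.toStr count1 ++ PySem.Int.toStr count2)).getD 0
  if total_love_score < 10 ∨ total_love_score > 90 then
    "Your score is " ++ PySem.Int.toStr total_love_score ++ ", you go together like coke and mentos."
  else if total_love_score > 40 ∧ total_love_score < 50 then
    "Your score is " ++ PySem.Int.toStr total_love_score ++ ", you are alright together."
  else
    "Your score is " ++ PySem.Int.toStr total_love_score ++ "."

-- ===== PRECONDITION & SPEC =====
def Spec_love_calculator (name1 : String) (name2 : String) (out : String) : Prop := out = love_calculator_alt name1 name2
instance (name1 : String) (name2 : String) (out : String) : Decidable (Spec_love_calculator name1 name2 out) := by unfold Spec_love_calculator; infer_instance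

-- ===== CLAIM (what is proved, stated in full; the proofs are below) =====
def Claim_equal_love_calculator : Prop := ∀ (name1 : String) (name2 : String), Dom_love_calculator name1 name2 → Spec_love_calculator name1 name2 (love_calculator name1 name2)

-- ===== LEMMAS AND PROOFS =====

-- `c_str in s` for a one-character string is character membership
theorem isIn_singleton (c : Char) (s : List Char) :
    PySem.Chars.isIn [c] s = true ↔ c ∈ s := by
  rw [PySem.Chars.isIn_iff_infix]
  constructor
  · intro h; exact h.mem (List.mem_singleton_self c)
  · intro h
    obtain ⟨u, v, rfl⟩ := List.append_of_mem h
    exact ⟨u, v, by simp⟩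

-- A's paired-counter loop computes the two membership counts
theorem foldA (w1 w2 : List Char) (l : List Char) (a b : Int) :
    l.foldl (fun acc letter =>
        let acc := if PySem.Chars.isIn [letter] w1 then (acc.1 + 1, acc.2) else acc
        if PySem.Chars.isIn [letter] w2 then (acc.1, acc.2 + 1) else acc) (a, b)
      = (a + (l.countP (fun x => x ∈ w1) : Int), b + (l.countP (fun x => x ∈ w2) : Int)) := by
  induction l generalizing a b with
  | nil => simp
  | cons x l ih =>
    rw [List.foldl_cons]
    have step : (let acc := if PySem.Chars.isIn [x] w1 then (((a, b) : Int × Int).1 + 1, ((a, b) : Int × Int).2) else (a, b)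
        if PySem.Chars.isIn [x] w2 then (acc.1, acc.2 + 1) else acc)
        = ((if x ∈ w1 then a + 1 else a, if x ∈ w2 then b + 1 else b) : Int × Int) := by
      by_cases h1 : x ∈ w1 <;> by_cases h2 : x ∈ w2 <;> simp [isIn_singleton, h1, h2]
    rw [step, ih]
    by_cases h1 : x ∈ w1 <;> by_cases h2 : x ∈ w2 <;>
      simp [h1, h2, Prod.ext_iff] <;> omega

-- membership count in a word with pairwise-distinct letters = sum of per-letter counts
theorem countP_true (l : List Char) :
    (l.countP (fun x => x ∈ ("true".toList)) : Int)
      = ("true".toList.map (fun c => (PySem.List.count l c : Int))).sum := by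
  induction l with
  | nil => simp [PySem.List.count]
  | cons x l ih =>
    simp only [List.countP_cons, PySem.List.count, List.count_cons] at *
    by_cases h1 : x = 't' <;> by_cases h2 : x = 'r' <;> by_cases h3 : x = 'u' <;> by_cases h4 : x = 'e' <;>
      simp_all <;> ring

theorem countP_love (l : List Char) :
    (l.countP (fun x => x ∈ ("love".toList)) : Int)
      = ("love".toList.map (fun c => (PySem.List.count l c : Int))).sum := by
  induction l with
  | nil => simp [PySem.List.count]
  | cons x l ih =>
    simp only [List.countP_cons, PySem.List.count, List.count_cons] at *
    by_cases h1 : x = 'l' <;> by_cases h2 : x = 'o' <;> by_cases h3 : x = 'v' <;> by_cases h4 : x = 'e' <;>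
      simp_all <;> ring

-- ===== VERDICT (by name: the statement is the Claim_ definition above) =====
theorem love_calculator_spec : Claim_equal_love_calculator := by
  intro name1 name2 _
  unfold Spec_love_calculator love_calculator love_calculator_alt
  simp only [foldA, zero_add]
  rw [show PySem.Str.lower "TRUE" = "true" from rfl, show PySem.Str.lower "LOVE" = "love" from rfl]
  rw [countP_true, countP_love]
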